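-- pv_equiv track=rewrite | github.com/visionlab-coder/Ai-Agent-Superpack | regenerate_srt.py | format_block_lines
-- ===== SOURCE A (Python) =====
-- MAX_LINE_CHARS = 35
--
-- def format_block_lines(block):
--     """블록 텍스트를 최대 2줄, 줄당 35자 이내로 포맷한다."""
--     if len(block) <= MAX_LINE_CHARS:
--         return block
--
--     # 2줄로 나누기: 쉼표, 마침표, 공백 경계에서 분할
--     mid = len(block) // 2
--
--     for offset in range(0, len(block) // 2):
--         for pos in [mid + offset, mid - offset]:
--             if 0 < pos < len(block):
--                 ch = block[pos]
--                 prev = block[pos - 1] if pos > 0 else ''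
--                 if ch == ' ' or prev in ',.':
--                     line1 = block[:pos].strip()
--                     line2 = block[pos:].strip()
--                     if len(line1) <= MAX_LINE_CHARS and len(line2) <= MAX_LINE_CHARS:
--                         return f"{line1}\n{line2}"
--
--     # 분할점을 못 찾으면 35자에서 강제 분할
--     return f"{block[:MAX_LINE_CHARS]}\n{block[MAX_LINE_CHARS:MAX_LINE_CHARS * 2]}"
-- ===== SOURCE B (Python) =====
-- MAX_LINE_CHARS = 35
--
-- def format_block_lines(block):
--     """블록 텍스트를 최대 2줄, 줄당 35자 이내로 포맷한다."""
--     if len(block) <= MAX_LINE_CHARS: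
--         return block
--
--     mid = len(block) // 2
--     # Stage 1: one linear pass collects every admissible split position
--     # (boundary char and both stripped halves fit in 35 chars).
--     valid = [p for p in range(1, 2 * mid)
--              if (block[p] == ' ' or block[p - 1] in ',.')
--              and len(block[:p].strip()) <= MAX_LINE_CHARS
--              and len(block[p:].strip()) <= MAX_LINE_CHARS]
--     # Stage 2: pick the admissible position closest to the middle,
--     # preferring the right-hand one on ties.
--     if valid:
--         pos = min(valid, key=lambda p: (abs(p - mid), p < mid))
--         return f"{block[:pos].strip()}\n{block[pos:].strip()}"
--
--     return f"{block[:MAX_LINE_CHARS]}\n{block[MAX_LINE_CHARS:MAX_LINE_CHARS * 2]}"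
-- ===== Notes on version B (the rewrite author's own statement) =====
-- stated objective: alternative
-- what changed: A's nested outward offset search with early return is replaced by two staged passes: one linear filter collecting every admissible split position, then min() with the key (abs(pos-mid), pos<mid) to pick A's position.
import Mathlib
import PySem

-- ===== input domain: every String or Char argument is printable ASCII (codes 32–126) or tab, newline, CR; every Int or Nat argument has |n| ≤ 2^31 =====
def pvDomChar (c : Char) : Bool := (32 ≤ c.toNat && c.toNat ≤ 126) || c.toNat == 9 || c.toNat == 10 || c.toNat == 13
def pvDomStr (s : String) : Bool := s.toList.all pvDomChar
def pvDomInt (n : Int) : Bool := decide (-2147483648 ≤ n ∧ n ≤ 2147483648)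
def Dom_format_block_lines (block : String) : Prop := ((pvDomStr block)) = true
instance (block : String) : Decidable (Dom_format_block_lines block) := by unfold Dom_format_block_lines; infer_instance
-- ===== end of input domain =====

-- B replaces A's nested outward offset search (early return) by two staged passes:
-- one linear filter collecting every admissible split position, then min() with the
-- key (abs(pos-mid), pos<mid); same return value everywhere (objective: alternative).

def MAX_LINE_CHARS : Int := 35

-- ===== PORT A =====
-- body of A's inner loop over pos ∈ [mid+offset, mid-offset]; some r = 'return r'
def fblTryA (block : String) (pos : Int) : Option String :=
  if 0 < pos ∧ pos < PySem.Str.len block then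
    let ch := (PySem.Str.pyGet? block pos).getD ' '   -- block[pos]; in range under the guard
    let prevOk : Bool :=
      if 0 < pos then
        match PySem.Str.pyGet? block (pos - 1) with   -- block[pos-1]; in range since 0 < pos
        | some c => c == ',' || c == '.'
        | none => false
      else true                                       -- Python: '' in ',.' is True (unreachable: guard gives 0 < pos)
    if ch == ' ' || prevOk then
      let line1 := PySem.Str.strip (PySem.Str.slice block none (some pos))
      let line2 := PySem.Str.strip (PySem.Str.slice block (some pos) none)
      if PySem.Str.len line1 ≤ MAX_LINE_CHARS ∧ PySem.Str.len line2 ≤ MAX_LINE_CHARS then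
        some (line1 ++ "\n" ++ line2)
      else none
    else none
  else none

def format_block_lines (block : String) : String :=
  if PySem.Str.len block ≤ MAX_LINE_CHARS then block
  else
    let mid := PySem.Int.floordiv (PySem.Str.len block) 2
    match (PySem.List.pyRange 0 (PySem.Int.floordiv (PySem.Str.len block) 2)).findSome?
        (fun offset => [mid + offset, mid - offset].findSome? (fblTryA block)) with
    | some r => r
    | none =>
        PySem.Str.slice block none (some MAX_LINE_CHARS) ++ "\n" ++
        PySem.Str.slice block (some MAX_LINE_CHARS) (some (MAX_LINE_CHARS * 2))

-- ===== PORT B =====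
-- the list-comprehension filter of Source B: is p an admissible split position?
def fblOkB (block : String) (p : Int) : Bool :=
  match PySem.Str.pyGet? block p, PySem.Str.pyGet? block (p - 1) with
  | some ch, some prev =>
      (ch == ' ' || prev == ',' || prev == '.')
      && PySem.Str.len (PySem.Str.strip (PySem.Str.slice block none (some p))) ≤ MAX_LINE_CHARS
      && PySem.Str.len (PySem.Str.strip (PySem.Str.slice block (some p) none)) ≤ MAX_LINE_CHARS
  | _, _ => false   -- out of range: Python would raise IndexError; unreachable for p ∈ range(1, 2*mid)

-- the f-string result Source B builds from the chosen position
def fblFmtB (block : String) (pos : Int) : String :=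
  PySem.Str.strip (PySem.Str.slice block none (some pos)) ++ "\n" ++
  PySem.Str.strip (PySem.Str.slice block (some pos) none)

-- min(valid, key=lambda p: (abs(p - mid), p < mid)): Python's min keeps the FIRST element
-- whose key tuple is lexicographically least; exact port of that scan (bool < bool is 0/1 < 0/1)
def fblMin (mid : Int) (l : List Int) : Option Int :=
  l.foldl (fun acc x =>
    match acc with
    | none => some x
    | some mm =>
        if |x - mid| < |mm - mid|
            ∨ (¬ |mm - mid| < |x - mid|
                ∧ (if x < mid then (1:Int) else 0) < (if mm < mid then (1:Int) else 0))
        then some x else some mm) none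

def format_block_lines_alt (block : String) : String :=
  if PySem.Str.len block ≤ MAX_LINE_CHARS then block
  else
    let mid := PySem.Int.floordiv (PySem.Str.len block) 2
    let valid := (PySem.List.pyRange 1 (2 * mid)).filter (fblOkB block)
    match fblMin mid valid with
    | some pos => fblFmtB block pos
    | none =>
        PySem.Str.slice block none (some MAX_LINE_CHARS) ++ "\n" ++
        PySem.Str.slice block (some MAX_LINE_CHARS) (some (MAX_LINE_CHARS * 2))

-- ===== PRECONDITION & SPEC =====
def Spec_format_block_lines (block : String) (out : String) : Prop := out = format_block_lines_alt block
instance (block : String) (out : String) : Decidable (Spec_format_block_lines block out) := by unfold Spec_format_block_lines; infer_instance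

-- ===== CLAIM (what is proved, stated in full; the proofs are below) =====
def Claim_equal_format_block_lines : Prop := ∀ (block : String), Dom_format_block_lines block → Spec_format_block_lines block (format_block_lines block)

-- ===== LEMMAS AND PROOFS =====

-- A's implicit priority of a position: 2*distance-from-mid, right side first on ties
def fblKey (mid p : Int) : Int := 2 * |p - mid| + (if p < mid then 1 else 0)

-- A's search order, flattened: mid, then mid+1, mid-1, mid+2, mid-2, ...
def fblOrder (mid : Int) (k : Nat) : List Int :=
  mid :: (PySem.List.pyRange 1 ((k : Int) + 1)).flatMap (fun o => [mid + o, mid - o])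

-- proof-side flat body shared by both directions
def fblBody (block : String) (p : Int) : Option String :=
  if fblOkB block p then some (fblFmtB block p) else none

lemma fblKey_plus (mid o : Int) (h : 0 <= o) : fblKey mid (mid + o) = 2 * o := by
  unfold fblKey
  rw [show mid + o - mid = o by ring, abs_of_nonneg h, if_neg (by omega)]
  ring

lemma fblKey_minus (mid o : Int) (h : 0 < o) : fblKey mid (mid - o) = 2 * o + 1 := by
  unfold fblKey
  rw [show mid - o - mid = -o by ring, abs_neg, abs_of_nonneg h.le, if_pos (by omega)]

lemma fblOrder_succ (mid : Int) (k : Nat) :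
    fblOrder mid (k + 1) = fblOrder mid k ++ [mid + ((k : Int) + 1), mid - ((k : Int) + 1)] := by
  unfold fblOrder
  push_cast
  rw [PySem.List.pyRange_one_succ_right (by omega)]
  simp

lemma fblOrder_perm (mid : Int) (k : Nat) :
    (fblOrder mid k).Perm (PySem.List.pyRange (mid - k) (mid + k + 1)) := by
  induction k with
  | zero =>
      simp [fblOrder, PySem.List.pyRange_one_eq_nil]
  | succ k ih =>
      rw [fblOrder_succ]
      have htar : PySem.List.pyRange (mid - ((k : Nat) + 1 : Int)) (mid + ((k : Nat) + 1 : Int) + 1)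
          = (mid - ((k : Int) + 1)) ::
            (PySem.List.pyRange (mid - k) (mid + k + 1) ++ [mid + ((k : Int) + 1)]) := by
        rw [show (mid - ((k : Nat) + 1 : Int)) = (mid - ((k:Int) + 1)) by ring,
            PySem.List.pyRange_one_cons (by omega),
            show (mid - ((k:Int) + 1) + 1) = mid - (k : Int) by ring,
            show (mid + ((k : Nat) + 1 : Int) + 1) = (mid + (k:Int) + 1) + 1 by ring,
            PySem.List.pyRange_one_succ_right (by omega),
            show (mid + (k:Int) + 1) = mid + ((k:Int) + 1) by ring]
      rw [show ((k+1 : Nat) : Int) = ((k : Nat) + 1 : Int) by omega, htar]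
      rw [show fblOrder mid k ++ [mid + ((k:Int) + 1), mid - ((k:Int) + 1)]
            = (fblOrder mid k ++ [mid + ((k:Int) + 1)]) ++ [mid - ((k:Int) + 1)] by simp]
      exact (List.perm_append_comm).trans (((ih.append_right _).cons _))

lemma fblKey_le_of_mem (mid : Int) (k : Nat) (p : Int) (hp : p ∈ fblOrder mid k) :
    fblKey mid p <= 2 * k + 1 := by
  have h := (fblOrder_perm mid k).mem_iff.mp hp
  rw [PySem.List.mem_pyRange_one] at h
  unfold fblKey
  rcases abs_cases (p - mid) with ⟨h1, h2⟩ | ⟨h1, h2⟩ <;> rw [h1] <;> split_ifs <;> omega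

lemma fblOrder_pairwise (mid : Int) (k : Nat) :
    (fblOrder mid k).Pairwise (fun a b => fblKey mid a < fblKey mid b) := by
  induction k with
  | zero => simp [fblOrder, PySem.List.pyRange_one_eq_nil]
  | succ k ih =>
      rw [fblOrder_succ]
      refine List.pairwise_append.mpr ⟨ih, ?_, ?_⟩
      · simp only [List.pairwise_cons, List.mem_singleton, List.Pairwise.nil, and_true]
        refine ⟨fun b hb => ?_, by simp⟩
        subst hb
        rw [fblKey_plus mid _ (by omega), fblKey_minus mid _ (by omega)]
        omega
      · intro a ha b hb
        have hk := fblKey_le_of_mem mid k a ha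
        simp only [List.mem_cons, List.not_mem_nil, or_false] at hb
        rcases hb with rfl | rfl
        · rw [fblKey_plus mid _ (by omega)]; omega
        · rw [fblKey_minus mid _ (by omega)]; omega

lemma findSome?_flatMap {α β γ : Type} (f : α → Option β) (h : γ → List α) (l : List γ) :
    (l.flatMap h).findSome? f = l.findSome? (fun x => (h x).findSome? f) := by
  induction l with
  | nil => rfl
  | cons a l ih =>
      simp only [List.flatMap_cons, List.findSome?_append, List.findSome?_cons, ih]
      cases List.findSome? f (h a) <;> rfl

lemma findSome?_congr_mem {α β : Type} (l : List α) (f g : α → Option β)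
    (h : ∀ x ∈ l, f x = g x) : l.findSome? f = l.findSome? g := by
  induction l with
  | nil => rfl
  | cons a l ih =>
      simp only [List.findSome?_cons, h a (by simp)]
      cases g a with
      | some b => rfl
      | none => exact ih fun x hx => h x (by simp [hx])

-- findSome? of a guarded body = head of the filtered list, mapped
lemma findSome?_eq_filter_head {α β : Type} (q : α → Bool) (g : α → β) (l : List α) :
    l.findSome? (fun x => if q x then some (g x) else none)
      = (l.filter q).head?.map g := by
  induction l with
  | nil => rfl
  | cons a l ih =>
      by_cases h : q a
      · simp [h]
      · simp [h, ih]

lemma fblBody_eq (block : String) (pos : Int) (h1 : 0 < pos)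
    (h2 : pos < (block.toList.length : Int)) :
    fblTryA block pos = fblBody block pos := by
  have hn0 : (0:Int) <= pos := h1.le
  have hp0 : (0:Int) <= pos - 1 := by omega
  have hp2 : pos - 1 < (block.toList.length : Int) := by omega
  have e1 : PySem.Str.pyGet? block pos = some (block.toList[pos.toNat]) := by
    rw [PySem.Str.pyGet?_eq, PySem.Chars.pyGet?_eq_listPyGet?,
        PySem.List.pyGet?_eq_some_getElem _ hn0 h2]
  have e2 : PySem.Str.pyGet? block (pos - 1) = some (block.toList[(pos - 1).toNat]) := by
    rw [PySem.Str.pyGet?_eq, PySem.Chars.pyGet?_eq_listPyGet?,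
        PySem.List.pyGet?_eq_some_getElem _ hp0 hp2]
  unfold fblTryA fblBody fblOkB fblFmtB
  rw [if_pos ⟨h1, by rw [PySem.Str.len_eq]; exact h2⟩, if_pos h1]
  simp only [e1, e2, Option.getD_some]
  by_cases hL1 : PySem.Str.len (PySem.Str.strip (PySem.Str.slice block none (some pos))) ≤ MAX_LINE_CHARS
  · by_cases hL2 : PySem.Str.len (PySem.Str.strip (PySem.Str.slice block (some pos) none)) ≤ MAX_LINE_CHARS
    · have hpl : PySem.Str.len (PySem.Str.strip (PySem.Str.slice block none (some pos))) ≤ MAX_LINE_CHARS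
          ∧ PySem.Str.len (PySem.Str.strip (PySem.Str.slice block (some pos) none)) ≤ MAX_LINE_CHARS := ⟨hL1, hL2⟩
      rw [decide_eq_true hL1, decide_eq_true hL2, Bool.and_true, Bool.and_true, if_pos hpl]
      simp only [Bool.or_assoc]
    · have hnl : ¬(PySem.Str.len (PySem.Str.strip (PySem.Str.slice block none (some pos))) ≤ MAX_LINE_CHARS
          ∧ PySem.Str.len (PySem.Str.strip (PySem.Str.slice block (some pos) none)) ≤ MAX_LINE_CHARS) :=
        fun h => hL2 h.2
      rw [decide_eq_false hL2, Bool.and_false, if_neg hnl, if_neg (Bool.false_ne_true), ite_self]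
  · have hnl : ¬(PySem.Str.len (PySem.Str.strip (PySem.Str.slice block none (some pos))) ≤ MAX_LINE_CHARS
        ∧ PySem.Str.len (PySem.Str.strip (PySem.Str.slice block (some pos) none)) ≤ MAX_LINE_CHARS) :=
      fun h => hL1 h.1
    rw [decide_eq_false hL1, Bool.and_false, Bool.false_and, if_neg hnl, if_neg (Bool.false_ne_true), ite_self]

-- fblMin's pairwise comparison agrees with the single integer key fblKey
lemma fblCmp_iff (mid x y : Int) :
    (|x - mid| < |y - mid|
      ∨ (¬ |y - mid| < |x - mid|
          ∧ (if x < mid then (1:Int) else 0) < (if y < mid then (1:Int) else 0)))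
    ↔ fblKey mid x < fblKey mid y := by
  unfold fblKey
  rcases abs_cases (x - mid) with ⟨e1, _⟩ | ⟨e1, _⟩ <;>
    rcases abs_cases (y - mid) with ⟨e2, _⟩ | ⟨e2, _⟩ <;>
      rw [e1, e2] <;> split_ifs <;> omega

-- fblMin returns the unique fblKey-minimal element of the list
lemma fblMin_foldl_eq_of_unique_min (mid : Int) (m : Int) :
    ∀ (l : List Int) (acc : Option Int),
    (∀ x ∈ l, x = m ∨ fblKey mid m < fblKey mid x) →
    (m ∈ l ∨ acc = some m) →
    (∀ a, acc = some a → a = m ∨ fblKey mid m < fblKey mid a) →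
    l.foldl (fun acc x =>
      match acc with
      | none => some x
      | some mm =>
          if |x - mid| < |mm - mid|
              ∨ (¬ |mm - mid| < |x - mid|
                  ∧ (if x < mid then (1:Int) else 0) < (if mm < mid then (1:Int) else 0))
          then some x else some mm) acc = some m := by
  intro l
  induction l with
  | nil =>
      intro acc _ hmem hacc
      rcases hmem with h | h
      · exact absurd h (List.not_mem_nil)
      · simpa using h
  | cons x t ih =>
      intro acc hall hmem hacc
      have hx := hall x (by simp)
      simp only [List.foldl_cons]
      set acc' := (match acc with
        | none => some x
        | some mm =>
            if |x - mid| < |mm - mid|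
                ∨ (¬ |mm - mid| < |x - mid|
                    ∧ (if x < mid then (1:Int) else 0) < (if mm < mid then (1:Int) else 0))
            then some x else some mm) with hacc'
      have hinv : ∀ a, acc' = some a → a = m ∨ fblKey mid m < fblKey mid a := by
        intro a ha
        rw [hacc'] at ha
        cases acc with
        | none => simp at ha; subst ha; exact hx
        | some mm =>
            have hmm := hacc mm rfl
            by_cases hc : |x - mid| < |mm - mid|
                ∨ (¬ |mm - mid| < |x - mid|
                    ∧ (if x < mid then (1:Int) else 0) < (if mm < mid then (1:Int) else 0))
            · simp only [if_pos hc, Option.some.injEq] at ha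
              exact ha ▸ hx
            · simp only [if_neg hc, Option.some.injEq] at ha
              exact ha ▸ hmm
      have hmem' : m ∈ t ∨ acc' = some m := by
        rcases hmem with hm | hm
        · rcases List.mem_cons.mp hm with rfl | hmt
          · right
            rw [hacc']
            cases acc with
            | none => rfl
            | some mm =>
                rcases hacc mm rfl with rfl | hlt
                · simp only []
                  split_ifs <;> rfl
                · simp only []
                  rw [if_pos ((fblCmp_iff mid m mm).mpr hlt)]
          · left; exact hmt
        · right
          rw [hacc', hm]
          rcases hx with rfl | hlt
          · simp only []
            split_ifs <;> rfl
          · simp only []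
            rw [if_neg (fun hc => by have := (fblCmp_iff mid x m).mp hc; omega)]
      exact ih acc' (fun y hy => hall y (by simp [hy])) hmem' hinv

-- the two search strategies agree: A's outward scan = B's filter-then-min
lemma fblMain (block : String) (m : Nat) (hm : 18 <= m) (hn : 2 * m <= block.toList.length) :
    (PySem.List.pyRange 0 (m : Int)).findSome?
        (fun offset => [(m:Int) + offset, (m:Int) - offset].findSome? (fblTryA block))
      = (fblMin (m:Int) ((PySem.List.pyRange 1 (2 * (m:Int))).filter (fblOkB block))).map (fblFmtB block) := by
  have hcast : ((m - 1 : Nat) : Int) + 1 = (m : Int) := by omega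
  -- L is A's visiting order; it is a permutation of range(1, 2*mid)
  have hperm : (fblOrder (m:Int) (m-1)).Perm (PySem.List.pyRange 1 (2 * (m:Int))) := by
    have h := fblOrder_perm (m:Int) (m-1)
    rw [show ((m:Int) - ((m-1:Nat):Int)) = 1 by omega,
        show ((m:Int) + ((m-1:Nat):Int) + 1) = 2*(m:Int) by omega] at h
    exact h
  -- A's nested loop = flat findSome? over L with fblBody
  have hA : (PySem.List.pyRange 0 (m : Int)).findSome?
        (fun offset => [(m:Int) + offset, (m:Int) - offset].findSome? (fblTryA block))
      = (fblOrder (m:Int) (m-1)).findSome? (fblBody block) := by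
    unfold fblOrder
    rw [hcast, PySem.List.pyRange_one_cons (show (0:Int) < (m:Int) by omega)]
    rw [show (0:Int) + 1 = 1 from rfl]
    have hmidb := fblBody_eq block (m:Int) (by omega) (by omega)
    have hcong : (PySem.List.pyRange 1 (m:Int)).findSome?
          (fun offset => [(m:Int) + offset, (m:Int) - offset].findSome? (fblTryA block))
        = (PySem.List.pyRange 1 (m:Int)).findSome?
          (fun offset => [(m:Int) + offset, (m:Int) - offset].findSome? (fblBody block)) := by
      apply findSome?_congr_mem
      intro o ho
      rw [PySem.List.mem_pyRange_one] at ho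
      simp only [List.findSome?_cons, List.findSome?_nil]
      rw [fblBody_eq block ((m:Int) + o) (by omega) (by omega),
          fblBody_eq block ((m:Int) - o) (by omega) (by omega)]
    simp only [List.findSome?_cons, List.findSome?_nil, add_zero, sub_zero, hmidb] at hcong ⊢
    rw [findSome?_flatMap]
    simp only [List.findSome?_cons, List.findSome?_nil]
    rw [hcong]
    cases fblBody block (m:Int) <;> rfl
  rw [hA]
  have hbody : (fblOrder (m:Int) (m-1)).findSome? (fblBody block)
      = ((fblOrder (m:Int) (m-1)).filter (fblOkB block)).head?.map (fblFmtB block) := by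
    unfold fblBody
    exact findSome?_eq_filter_head _ _ _
  rw [hbody]
  -- the filtered lists are permutations of each other; L's filter is fblKey-sorted
  have hfperm : ((fblOrder (m:Int) (m-1)).filter (fblOkB block)).Perm
      ((PySem.List.pyRange 1 (2 * (m:Int))).filter (fblOkB block)) := hperm.filter _
  have hfsort : ((fblOrder (m:Int) (m-1)).filter (fblOkB block)).Pairwise
      (fun a b => fblKey (m:Int) a < fblKey (m:Int) b) :=
    (fblOrder_pairwise (m:Int) (m-1)).sublist List.filter_sublist
  cases hfl : (fblOrder (m:Int) (m-1)).filter (fblOkB block) with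
  | nil =>
      have he : (PySem.List.pyRange 1 (2 * (m:Int))).filter (fblOkB block) = [] :=
        List.Perm.eq_nil ((hfl ▸ hfperm).symm)
      simp [he, fblMin]
  | cons h t =>
      rw [hfl] at hfperm hfsort
      rw [List.pairwise_cons] at hfsort
      have hmin : fblMin (m:Int) ((PySem.List.pyRange 1 (2 * (m:Int))).filter (fblOkB block)) = some h := by
        unfold fblMin
        exact fblMin_foldl_eq_of_unique_min (m:Int) h _ none
          (fun x hx => by
            rcases List.mem_cons.mp (hfperm.mem_iff.mpr hx) with rfl | hxt
            · exact Or.inl rfl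
            · exact Or.inr (hfsort.1 x hxt))
          (Or.inl (hfperm.mem_iff.mp (by simp)))
          (fun a ha => absurd ha (by simp))
      simp [hmin]

-- ===== VERDICT (by name: the statement is the Claim_ definition above) =====
theorem format_block_lines_spec : Claim_equal_format_block_lines := by
  intro block _
  unfold Spec_format_block_lines format_block_lines format_block_lines_alt
  by_cases hle : PySem.Str.len block <= MAX_LINE_CHARS
  · rw [if_pos hle, if_pos hle]
  · rw [if_neg hle, if_neg hle]
    have hlen := PySem.Str.len_eq block
    have hn : 36 <= block.toList.length := by
      rw [hlen] at hle; unfold MAX_LINE_CHARS at hle; omega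
    have hmid : PySem.Int.floordiv (PySem.Str.len block) 2
        = ((block.toList.length / 2 : Nat) : Int) := by
      rw [hlen]; simp [PySem.Int.floordiv, Int.fdiv_eq_ediv]
    simp only [hmid]
    rw [fblMain block (block.toList.length / 2) (by omega) (by omega)]
    cases fblMin ((block.toList.length / 2 : Nat) : Int)
        ((PySem.List.pyRange 1 (2 * ((block.toList.length / 2 : Nat) : Int))).filter (fblOkB block)) <;> rfl
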